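-- pv_equiv track=rewrite | github.com/Tiagosvi/Introduccion-a-la-programacion-I | sueltos.py | nombre_lista
-- ===== SOURCE A (Python) =====
-- def nombre_lista (nombre:str, stock_cambios:list[tuple[str,int]]) -> tuple[int,int]:
--     acumular:list[int] = []
--     res:tuple[int,int] = ()
--     for i in range(len(stock_cambios)):
--         if stock_cambios[i][0] == nombre:
--             acumular.append(stock_cambios[i][1])
--
--     maximo = acumular[0]
--     minimo = acumular[0]
--
--     for i in range (1,len(acumular)):
--         if acumular[i] > maximo:
--             maximo = acumular[i]
--         elif acumular [i] < minimo:
--             minimo = acumular[i]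
--
--     res = (minimo,maximo)
--     return res
-- ===== SOURCE B (Python) =====
-- def nombre_lista(nombre: str, stock_cambios: list[tuple[str, int]]) -> tuple[int, int]:
--     s = sorted(v for n, v in stock_cambios if n == nombre)
--     return (s[0], s[-1])
-- ===== Notes on version B (the rewrite author's own statement) =====
-- stated objective: simpler
-- what changed: Replaces A's two explicit index loops (filter pass plus running min/max scan with branch order if>max elif<min) by a one-line comprehension filtering the matching values and a single sort whose endpoints s[0]/s[-1] are the min and max.
import Mathlib
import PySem

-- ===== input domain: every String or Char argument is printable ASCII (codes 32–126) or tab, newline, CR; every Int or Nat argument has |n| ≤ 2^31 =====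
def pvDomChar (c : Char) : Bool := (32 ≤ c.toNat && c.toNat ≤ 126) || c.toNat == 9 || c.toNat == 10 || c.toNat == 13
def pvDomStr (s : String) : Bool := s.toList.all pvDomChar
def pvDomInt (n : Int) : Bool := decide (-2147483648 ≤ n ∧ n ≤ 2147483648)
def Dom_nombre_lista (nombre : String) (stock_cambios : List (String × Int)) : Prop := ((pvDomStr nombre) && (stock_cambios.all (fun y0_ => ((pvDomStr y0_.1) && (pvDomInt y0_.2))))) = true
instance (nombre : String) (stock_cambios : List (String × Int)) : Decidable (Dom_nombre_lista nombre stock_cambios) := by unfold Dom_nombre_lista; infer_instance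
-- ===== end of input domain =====

-- B replaces A's filter pass plus running min/max scan by collecting the matching values and
-- sorting them once, returning the sorted list's endpoints (objective: simpler).

-- ===== PORT A =====
def nombre_lista (nombre : String) (stock_cambios : List (String × Int)) : Int × Int :=
  -- first loop: acumular.append on matching names
  let acumular : List Int :=
    stock_cambios.foldl (fun acc p => if p.1 == nombre then acc ++ [p.2] else acc) []
  match acumular with
  | [] => (0, 0)  -- Python raises IndexError at acumular[0]; excluded by Pre_
  | a :: rest =>
    -- second loop over acumular[1:], state (maximo, minimo), both initialised to acumular[0]
    let mm := rest.foldl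
      (fun (s : Int × Int) x =>
        if x > s.1 then (x, s.2)
        else if x < s.2 then (s.1, x)
        else s)
      (a, a)
    (mm.2, mm.1)

-- ===== PORT B =====
def nombre_lista_alt (nombre : String) (stock_cambios : List (String × Int)) : Int × Int :=
  let s := PySem.List.sorted
    (stock_cambios.filterMap (fun p => if p.1 == nombre then some p.2 else none))
    (fun x => x) false
  match s with
  | [] => (0, 0)  -- Python raises IndexError at s[0]; excluded by Pre_
  | m :: t => (m, (m :: t).getLast (List.cons_ne_nil m t))

-- ===== PRECONDITION & SPEC =====
-- Pre_ excludes exactly the inputs with no entry named `nombre`, on which both Pythons raise IndexError.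
def Pre_nombre_lista (nombre : String) (stock_cambios : List (String × Int)) : Prop :=
  stock_cambios.filter (fun p => p.1 == nombre) ≠ []
instance (nombre : String) (stock_cambios : List (String × Int)) : Decidable (Pre_nombre_lista nombre stock_cambios) := by unfold Pre_nombre_lista; infer_instance

def pvWitness_nombre_lista : String × (List (String × Int)) := ("a", [("a", 3), ("b", 1), ("a", -2)])

def Spec_nombre_lista (nombre : String) (stock_cambios : List (String × Int)) (out : Int × Int) : Prop := out = nombre_lista_alt nombre stock_cambios
instance (nombre : String) (stock_cambios : List (String × Int)) (out : Int × Int) : Decidable (Spec_nombre_lista nombre stock_cambios out) := by unfold Spec_nombre_lista; infer_instance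

-- ===== CLAIM (what is proved, stated in full; the proofs are below) =====
def Claim_equal_nombre_lista : Prop := ∀ (nombre : String) (stock_cambios : List (String × Int)), Dom_nombre_lista nombre stock_cambios → Pre_nombre_lista nombre stock_cambios → Spec_nombre_lista nombre stock_cambios (nombre_lista nombre stock_cambios)

-- ===== LEMMAS AND PROOFS =====

-- B's comprehension equals A's filter-then-project value list
theorem pv_filterMap_eq (nombre : String) (l : List (String × Int)) :
    l.filterMap (fun p => if p.1 == nombre then some p.2 else none)
      = (l.filter (fun p => p.1 == nombre)).map (·.2) := by
  induction l with
  | nil => rfl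
  | cons h t ih => by_cases hc : h.1 = nombre <;> simp_all

-- A's scan computes the running min and max
theorem pv_scan (l : List Int) : ∀ (mx mn : Int), mn ≤ mx →
    l.foldl (fun (s : Int × Int) x =>
        if x > s.1 then (x, s.2) else if x < s.2 then (s.1, x) else s) (mx, mn)
      = (l.foldl max mx, l.foldl min mn) := by
  induction l with
  | nil => intro mx mn _; rfl
  | cons x t ih =>
    intro mx mn h
    simp only [List.foldl_cons]
    by_cases h1 : x > mx
    · have hmax : max mx x = x := by omega
      have hmin : min mn x = mn := by omega
      simp only [if_pos h1, hmax, hmin]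
      exact ih x mn (by omega)
    · by_cases h2 : x < mn
      · have hmax : max mx x = mx := by omega
        have hmin : min mn x = x := by omega
        simp only [if_neg h1, if_pos h2, hmax, hmin]
        exact ih mx x (by omega)
      · have hmax : max mx x = mx := by omega
        have hmin : min mn x = mn := by omega
        simp only [if_neg h1, if_neg h2, hmax, hmin]
        exact ih mx mn h

-- head of sorted(a::rest) is the running minimum
theorem pv_sorted_head (a : Int) (rest : List Int) (m : Int) (t : List Int)
    (hs : PySem.List.sorted (a :: rest) (fun x => x) false = m :: t) :
    m = rest.foldl min a := by
  have hmin : PySem.List.min? (a :: rest) (fun x => x) = some (rest.foldl min a) :=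
    PySem.List.min?_id_cons a rest
  have hmem : rest.foldl min a ∈ a :: rest := PySem.List.min?_mem hmin
  have hm_mem : m ∈ a :: rest := by
    have : m ∈ PySem.List.sorted (a :: rest) (fun x => x) false := by simp [hs]
    exact (PySem.List.mem_sorted _ _ _ _).mp this
  have h1 : m ≤ rest.foldl min a := PySem.List.key_head_sorted_le _ _ hs _ hmem
  have h2 : rest.foldl min a ≤ m := PySem.List.min?_isMin hmin m hm_mem
  omega

-- last of sorted(a::rest) is the running maximum
theorem pv_sorted_last (a : Int) (rest : List Int) (m : Int) (t : List Int)
    (hs : PySem.List.sorted (a :: rest) (fun x => x) false = m :: t) :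
    (m :: t).getLast (List.cons_ne_nil m t) = rest.foldl max a := by
  have hmax : PySem.List.max? (a :: rest) (fun x => x) = some (rest.foldl max a) :=
    PySem.List.max?_id_cons a rest
  have hmem : rest.foldl max a ∈ a :: rest := PySem.List.max?_mem hmax
  have hM_mem : rest.foldl max a ∈ m :: t := by
    rw [← hs]; exact (PySem.List.mem_sorted _ _ _ _).mpr hmem
  obtain ⟨i, hi, hieq⟩ := List.mem_iff_getElem.mp hM_mem
  have hq : (m :: t).length - 1 < (PySem.List.sorted (a :: rest) (fun x => x) false).length := by
    rw [hs]; simp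
  have hmono := PySem.List.sorted_id_getElem_mono (a :: rest)
    (p := i) (q := (m :: t).length - 1) (by simp at hi ⊢; omega) hq
  simp only [hs] at hmono
  have hlast : (m :: t).getLast (List.cons_ne_nil m t) = (m :: t)[(m :: t).length - 1] := by
    rw [List.getLast_eq_getElem]
  have hlast_mem : (m :: t).getLast (List.cons_ne_nil m t) ∈ a :: rest := by
    rw [hlast]
    refine (PySem.List.mem_sorted (a :: rest) (fun x => x) false _).mp ?_
    rw [hs]; exact List.getElem_mem _
  have h2 : (m :: t).getLast (List.cons_ne_nil m t) ≤ rest.foldl max a :=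
    PySem.List.max?_isMax hmax _ hlast_mem
  have h1 : rest.foldl max a ≤ (m :: t).getLast (List.cons_ne_nil m t) := by
    rw [hlast, ← hieq]; exact hmono
  omega

-- ===== VERDICT (by name: the statement is the Claim_ definition above) =====
theorem nombre_lista_spec : Claim_equal_nombre_lista := by
  intro nombre sc _ hpre
  unfold Spec_nombre_lista nombre_lista nombre_lista_alt
  have hacc : sc.foldl (fun acc p => if p.1 == nombre then acc ++ [p.2] else acc) []
      = (sc.filter (fun p => p.1 == nombre)).map (·.2) := by
    simpa using PySem.List.foldl_append_if (fun p => p.1 == nombre) (·.2) (l := sc) (acc := [])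
  rw [pv_filterMap_eq, hacc]
  cases hv : (sc.filter (fun p => p.1 == nombre)).map (·.2) with
  | nil =>
    unfold Pre_nombre_lista at hpre
    exact absurd (List.map_eq_nil_iff.mp hv) hpre
  | cons a rest =>
    simp only
    rw [pv_scan rest a a le_rfl]
    cases hs : PySem.List.sorted (a :: rest) (fun x => x) false with
    | nil => exact absurd hs (by simp [PySem.List.sorted_eq_nil_iff])
    | cons m t =>
      simp only
      rw [pv_sorted_last a rest m t hs, pv_sorted_head a rest m t hs]
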